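-- pv_equiv track=rewrite | github.com/tomasvanagas/prime-research | experiments/other/botkin_partition.py | model1_main_term
-- ===== SOURCE A (Python) =====
-- import math
--
-- def model1_main_term(n, div_func=None):
--     """
--     M(n) = 1 + 2 * sum_{j=1}^{n-1} ceil(d(j)/2)
--
--     Equivalent to: 1 + sum_{k=1}^{n-1} floor((n-1)/k) + floor(sqrt(n-1))
--     """
--     if n == 1:
--         return 2
--     # Use the floor-sum formulation for efficiency
--     N = n - 1
--     total = 0
--     for k in range(1, N + 1):
--         total += N // k
--     total += int(math.isqrt(N))
--     return 1 + total
-- ===== SOURCE B (Python) =====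
-- import math
--
-- def model1_main_term(n, div_func=None):
--     # Value-grouping (block) decomposition: N//k is constant on maximal blocks
--     # [i, N//(N//i)]; jump block by block, adding q * block_length.
--     # O(sqrt(N)) blocks instead of A's O(N) per-k loop.
--     if n == 1:
--         return 2
--     N = n - 1
--     total = 0
--     i = 1
--     while i <= N:
--         q = N // i
--         j = N // q
--         total += q * (j - i + 1)
--         i = j + 1
--     return 1 + total + math.isqrt(N)
-- ===== Notes on version B (the rewrite author's own statement) =====
-- stated objective: faster
-- what changed: Replaces A's O(N) per-k loop summing N//k with the value-grouping (block) decomposition that jumps over maximal blocks on which N//k is constant, adding q*(block length) per block, so only O(sqrt(N)) iterations run.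
import Mathlib
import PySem

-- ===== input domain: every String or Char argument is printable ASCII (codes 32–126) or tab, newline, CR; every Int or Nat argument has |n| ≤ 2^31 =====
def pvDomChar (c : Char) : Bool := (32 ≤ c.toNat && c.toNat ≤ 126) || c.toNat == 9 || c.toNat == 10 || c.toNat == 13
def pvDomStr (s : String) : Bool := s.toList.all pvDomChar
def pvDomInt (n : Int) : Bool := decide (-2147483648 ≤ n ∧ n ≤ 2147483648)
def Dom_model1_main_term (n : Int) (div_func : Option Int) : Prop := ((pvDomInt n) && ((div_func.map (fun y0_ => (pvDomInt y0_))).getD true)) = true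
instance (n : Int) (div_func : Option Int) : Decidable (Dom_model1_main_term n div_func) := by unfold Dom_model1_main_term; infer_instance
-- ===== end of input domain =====

-- B replaces A's O(N) per-k loop by the value-grouping (block) decomposition of the
-- divisor summatory sum, running O(sqrt(N)) block iterations.

-- ===== PORT A =====
-- A: loop k = 1..N adding N//k, then add isqrt(N).
-- math.isqrt(N) ported as Nat.sqrt N.toNat — exact for N ≥ 0; Python raises for N < 0 (excluded by Pre_).
def model1_main_term (n : Int) (div_func : Option Int) : Int :=
  if n = 1 then 2
  else
    let N := n - 1
    let total := (PySem.List.pyRange 1 (N + 1) 1).foldl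
      (fun acc k => acc + PySem.Int.floordiv N k) 0
    let total := total + ((Nat.sqrt N.toNat : Nat) : Int)
    1 + total

-- ===== PORT B =====
-- B's while loop: from i, one block contributes q * (j - i + 1) with q = N / i,
-- j = N / q, then continues at i = j + 1.  On the admitted inputs all these
-- quantities are nonnegative, so the port works over ℕ (Python's // = Nat./ there).
def pvBlockSum (N i : ℕ) : ℕ :=
  if h : 1 ≤ i ∧ i ≤ N then
    let q := N / i
    let j := N / q
    q * (j - i + 1) + pvBlockSum N (j + 1)
  else 0
termination_by N + 1 - i
decreasing_by
  have hq : 1 ≤ N / i := Nat.one_le_div_iff (by omega) |>.mpr h.2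
  have hij : i ≤ N / (N / i) :=
    (Nat.le_div_iff_mul_le hq).mpr (by simpa [Nat.mul_comm] using Nat.div_mul_le_self N i)
  omega

def model1_main_term_alt (n : Int) (div_func : Option Int) : Int :=
  if n = 1 then 2
  else
    let N := (n - 1).toNat
    let total := pvBlockSum N 1
    1 + (total : Int) + ((Nat.sqrt N : Nat) : Int)

-- ===== PRECONDITION & SPEC =====
-- A raises ValueError (math.isqrt of a negative number) for every n ≤ 0; it returns on all n ≥ 1.
def Pre_model1_main_term (n : Int) (div_func : Option Int) : Prop := 1 ≤ n
instance (n : Int) (div_func : Option Int) : Decidable (Pre_model1_main_term n div_func) := by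
  unfold Pre_model1_main_term; infer_instance
def pvWitness_model1_main_term : Int × Option Int := (10, some 3)
def Spec_model1_main_term (n : Int) (div_func : Option Int) (out : Int) : Prop := out = model1_main_term_alt n div_func
instance (n : Int) (div_func : Option Int) (out : Int) : Decidable (Spec_model1_main_term n div_func out) := by unfold Spec_model1_main_term; infer_instance

-- ===== CLAIM (what is proved, stated in full; the proofs are below) =====
def Claim_equal_model1_main_term : Prop := ∀ (n : Int) (div_func : Option Int), Dom_model1_main_term n div_func → Pre_model1_main_term n div_func → Spec_model1_main_term n div_func (model1_main_term n div_func)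

-- ===== LEMMAS AND PROOFS =====

-- The block recursion computes the tail of the divisor summatory sum.
theorem pv_blockSum_eq (N : ℕ) :
    ∀ m i, 1 ≤ i → N + 1 - i ≤ m → pvBlockSum N i = ∑ k ∈ Finset.Icc i N, N / k := by
  intro m
  induction m with
  | zero =>
    intro i hi hm
    rw [pvBlockSum, dif_neg (by omega)]
    rw [Finset.Icc_eq_empty (by omega)]
    simp
  | succ m ih =>
    intro i hi hm
    rw [pvBlockSum]
    by_cases h : 1 ≤ i ∧ i ≤ N
    · rw [dif_pos h]
      set q := N / i with hq
      set j := N / q with hj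
      have hq1 : 1 ≤ q := Nat.one_le_div_iff (by omega) |>.mpr h.2
      have hqj : q * j ≤ N := by
        have := Nat.div_mul_le_self N q
        simpa [hj, Nat.mul_comm] using this
      have hij : i ≤ j :=
        (Nat.le_div_iff_mul_le hq1).mpr (by simpa [hq, Nat.mul_comm] using Nat.div_mul_le_self N i)
      have hjN : j ≤ N := Nat.div_le_self N q
      have hblock : ∑ k ∈ Finset.Icc i j, N / k = q * (j - i + 1) := by
        have hconst : ∀ k ∈ Finset.Icc i j, N / k = q := by
          intro k hk
          rw [Finset.mem_Icc] at hk
          have hk0 : 0 < k := by omega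
          have hle : N / k ≤ q := by
            rw [hq]; exact Nat.div_le_div_left hk.1 (by omega)
          have hge : q ≤ N / k := by
            rw [Nat.le_div_iff_mul_le hk0]
            calc q * k ≤ q * j := Nat.mul_le_mul_left _ hk.2
              _ ≤ N := hqj
          omega
        rw [Finset.sum_congr rfl hconst, Finset.sum_const, Nat.card_Icc, smul_eq_mul]
        have : j + 1 - i = j - i + 1 := by omega
        rw [this, Nat.mul_comm]
      have hsplit : ∑ k ∈ Finset.Icc i N, N / k
          = ∑ k ∈ Finset.Icc i j, N / k + ∑ k ∈ Finset.Icc (j + 1) N, N / k := by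
        have hIcc : ∀ a b : ℕ, 1 ≤ a → Finset.Icc a b = Finset.Ioc (a - 1) b := by
          intro a b ha; ext k; simp; omega
        rw [hIcc i N hi, hIcc i j hi, hIcc (j + 1) N (by omega)]
        have : j + 1 - 1 = j := by omega
        rw [this]
        exact (Finset.sum_Ioc_consecutive _ (by omega) hjN).symm
      simp only []
      rw [hsplit, hblock, ih (j + 1) (by omega) (by omega)]
    · rw [dif_neg h]
      rw [Finset.Icc_eq_empty (by omega)]
      simp

-- bridge A's fold-over-pyRange to a Finset sum
theorem pv_fold_sumdiv (N m : ℕ) :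
    (PySem.List.pyRange 1 ((m : Int) + 1) 1).foldl
        (fun acc k => acc + PySem.Int.floordiv (N : Int) k) 0
      = ((∑ k ∈ Finset.Icc 1 m, N / k : ℕ) : Int) := by
  rw [PySem.List.foldl_add]
  induction m with
  | zero => simp [PySem.List.pyRange_one_eq_nil]
  | succ m ih =>
    have hcast : ((m + 1 : ℕ) : Int) + 1 = ((m : Int) + 1) + 1 := by push_cast; ring
    rw [hcast, PySem.List.pyRange_one_succ_right (by omega), List.map_append, List.sum_append]
    simp only [List.map_cons, List.map_nil, List.sum_cons, List.sum_nil]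
    rw [show ((m : Int) + 1) = ((m + 1 : ℕ) : Int) by push_cast; ring, PySem.Int.floordiv_natCast,
        Finset.sum_Icc_succ_top (Nat.le_add_left 1 m)]
    push_cast at ih ⊢
    omega

-- ===== VERDICT (by name: the statement is the Claim_ definition above) =====
theorem model1_main_term_spec : Claim_equal_model1_main_term := by
  intro n div_func _ hpre
  unfold Spec_model1_main_term model1_main_term model1_main_term_alt
  by_cases h1 : n = 1
  · rw [if_pos h1, if_pos h1]
  · simp only [if_neg h1]
    have hn2 : 2 ≤ n := by
      unfold Pre_model1_main_term at hpre; omega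
    set N : ℕ := (n - 1).toNat with hN
    have hNn : n - 1 = (N : Int) := by omega
    rw [hNn]
    rw [pv_fold_sumdiv N N, pv_blockSum_eq N (N + 1) 1 (by omega) (by omega)]
    push_cast
    ring
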